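-- pv_equiv track=rewrite | github.com/tjs23/nuc_processing | nuc_processing/NucContactMap.py | _get_num_isolated_groups
-- ===== SOURCE A (Python) =====
-- from collections import defaultdict
--
-- def _get_num_isolated_groups(positions, threshold=500000, pos_err=100):
--
--   num_isolated = 0
--   found = [0] * len(positions)
--
--   group_dict = defaultdict(list)
--   for p_a, p_b, ag in positions:
--     group_dict[ag].append((p_a, p_b))
--
--   groups = sorted(group_dict)
--
--   for i, ag_a in enumerate(groups):
--     if found[i]: # Already close to something else
--       continue
--
--     close = 0
--     for j, ag_b in enumerate(groups):
--       if j == i: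
--         continue
--
--       for p_a, p_b in group_dict[ag_a]:
--         for p_c, p_d in group_dict[ag_b]:
--           if (pos_err < abs(p_c-p_a) < threshold) and (pos_err < abs(p_d-p_b) < threshold):
--             close = 1
--             found[j] = 1
--             break
--
--           elif (pos_err < abs(p_d-p_a) < threshold) and (pos_err < abs(p_c-p_b) < threshold):
--             close = 1
--             found[j] = 1
--             break
--
--         else:
--           continue
--
--         break
--
--       if close:
--         break
--
--     if not close:
--       num_isolated += 1
--
--   return num_isolated
-- ===== SOURCE B (Python) =====
-- def _get_num_isolated_groups(positions, threshold=500000, pos_err=100):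
--   # Spatial-grid re-implementation: bin points into threshold-sized cells and
--   # compare each point only against points in the 3x3 neighbouring cells.
--   groups = {}
--   for a, b, g in positions:
--     groups.setdefault(g, []).append((a, b))
--
--   if threshold <= pos_err + 1 or threshold <= 0:
--     # no pair of coordinates can satisfy pos_err < |delta| < threshold
--     return len(groups)
--
--   grid = {}
--   for g, pts in groups.items():
--     for x, y in pts:
--       grid.setdefault((x // threshold, y // threshold), []).append((x, y, g))
--
--   def annular(u, v):
--     return pos_err < abs(u) < threshold and pos_err < abs(v) < threshold
--
--   def has_neighbor(g, a, b):
--     ca, cb = a // threshold, b // threshold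
--     for qa in (ca - 1, ca, ca + 1):
--       for qb in (cb - 1, cb, cb + 1):
--         for c, d, h in grid.get((qa, qb), ()):
--           if h != g and (annular(c - a, d - b) or annular(d - a, c - b)):
--             return True
--     return False
--
--   num_isolated = 0
--   for g, pts in groups.items():
--     if not any(has_neighbor(g, a, b) or has_neighbor(g, b, a) for a, b in pts):
--       num_isolated += 1
--   return num_isolated
-- ===== Notes on version B (the rewrite author's own statement) =====
-- stated objective: faster
-- what changed: Replaced the all-pairs group-vs-group scan with found[] bookkeeping by a spatial hash grid of threshold-sized cells: each point checks only points of other groups in the 3x3 neighbouring cells (plus the mirrored query for the swapped-coordinate condition), with the exact annular test applied to candidates; a group is isolated iff no query hits.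
import Mathlib
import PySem

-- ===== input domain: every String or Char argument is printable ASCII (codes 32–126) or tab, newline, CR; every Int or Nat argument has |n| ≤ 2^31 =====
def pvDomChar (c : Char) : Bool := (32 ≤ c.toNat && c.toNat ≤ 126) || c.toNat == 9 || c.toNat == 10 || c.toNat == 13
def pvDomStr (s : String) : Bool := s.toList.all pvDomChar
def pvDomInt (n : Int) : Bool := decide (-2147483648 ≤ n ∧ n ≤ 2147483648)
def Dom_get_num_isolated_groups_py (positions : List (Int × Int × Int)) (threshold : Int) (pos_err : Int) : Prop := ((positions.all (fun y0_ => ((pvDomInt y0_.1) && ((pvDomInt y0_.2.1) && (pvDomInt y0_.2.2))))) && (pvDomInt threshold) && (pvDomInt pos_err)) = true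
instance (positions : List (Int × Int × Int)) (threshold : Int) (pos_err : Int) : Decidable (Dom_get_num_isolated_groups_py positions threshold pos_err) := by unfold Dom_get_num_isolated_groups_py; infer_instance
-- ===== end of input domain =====

-- B replaces A's all-pairs group-vs-group scan (with found[] bookkeeping) by a spatial hash
-- grid of threshold-sized cells: each point is tested only against points of other groups in
-- the 3x3 neighbouring cells (plus a mirrored query for the swapped-coordinate branch), with
-- the exact annular test on candidates; objective: faster (asymptotically, for sparse data).


-- ===== PORT A =====
-- A's first if-branch: pos_err < abs(p_c-p_a) < threshold and pos_err < abs(p_d-p_b) < threshold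
def pvCond1A (pos_err threshold pa pb pc pd : Int) : Bool :=
  decide (pos_err < |pc - pa| ∧ |pc - pa| < threshold ∧ pos_err < |pd - pb| ∧ |pd - pb| < threshold)

-- A's elif-branch: pos_err < abs(p_d-p_a) < threshold and pos_err < abs(p_c-p_b) < threshold
def pvCond2A (pos_err threshold pa pb pc pd : Int) : Bool :=
  decide (pos_err < |pd - pa| ∧ |pd - pa| < threshold ∧ pos_err < |pc - pb| ∧ |pc - pb| < threshold)

-- innermost loop 'for p_c, p_d in group_dict[ag_b]', with its break (= return true)
def pvInnerA (threshold pos_err pa pb : Int) : List (Int × Int) → Bool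
  | [] => false
  | (pc, pd) :: rest =>
      if pvCond1A pos_err threshold pa pb pc pd then true
      else if pvCond2A pos_err threshold pa pb pc pd then true
      else pvInnerA threshold pos_err pa pb rest

-- loop 'for p_a, p_b in group_dict[ag_a]' with the for-else/break propagation
def pvOuterA (threshold pos_err : Int) (qs : List (Int × Int)) : List (Int × Int) → Bool
  | [] => false
  | (pa, pb) :: ps =>
      if pvInnerA threshold pos_err pa pb qs then true
      else pvOuterA threshold pos_err qs ps

-- the 'for j, ag_b in enumerate(groups)' loop: returns (close, found); breaks at the first
-- close group after setting found[j] = 1 (j is an enumerate index, always ≥ 0 and < len(found))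
def pvJLoopA (threshold pos_err : Int) (gd : PySem.Dict Int (List (Int × Int)))
    (psA : List (Int × Int)) (i : Int) (found : List Int) :
    List (Int × Int) → Bool × List Int
  | [] => (false, found)
  | (j, agb) :: rest =>
      if j = i then pvJLoopA threshold pos_err gd psA i found rest
      else if pvOuterA threshold pos_err (gd.getD agb []) psA then (true, found.set j.toNat 1)
      else pvJLoopA threshold pos_err gd psA i found rest

-- the 'for i, ag_a in enumerate(groups)' loop; acc = (num_isolated, found).
-- found[i] is read with default 0: the enumerate index i always satisfies
-- 0 ≤ i < len(groups) ≤ len(found) in the Python, so the default is never used.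
def pvILoopA (threshold pos_err : Int) (gd : PySem.Dict Int (List (Int × Int)))
    (groupsEnum : List (Int × Int)) (acc : Int × List Int) :
    List (Int × Int) → Int × List Int
  | [] => acc
  | (i, aga) :: rest =>
      if acc.2.getD i.toNat 0 ≠ 0 then pvILoopA threshold pos_err gd groupsEnum acc rest
      else
        let r := pvJLoopA threshold pos_err gd (gd.getD aga []) i acc.2 groupsEnum
        if r.1 then pvILoopA threshold pos_err gd groupsEnum (acc.1, r.2) rest
        else pvILoopA threshold pos_err gd groupsEnum (acc.1 + 1, r.2) rest

def get_num_isolated_groups_py (positions : List (Int × Int × Int)) (threshold : Int) (pos_err : Int) : Int :=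
  let found := List.replicate positions.length (0 : Int)
  -- defaultdict(list): group_dict[ag].append((p_a, p_b))
  let gd := positions.foldl
    (fun d p => d.modify p.2.2 [] (· ++ [(p.1, p.2.1)])) PySem.Dict.empty
  let groups := PySem.List.sorted gd.keys (fun x => x) false
  (pvILoopA threshold pos_err gd (PySem.List.enumerate groups 0) (0, found)
    (PySem.List.enumerate groups 0)).1

-- ===== PORT B =====
-- annular(u, v): pos_err < abs(u) < threshold and pos_err < abs(v) < threshold
def pvAnnB (threshold pos_err u v : Int) : Bool :=
  decide (pos_err < |u| ∧ |u| < threshold ∧ pos_err < |v| ∧ |v| < threshold)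

-- 'for c, d, h in grid.get((qa, qb), ())' with early return True
def pvScanCellB (threshold pos_err g a b : Int) : List (Int × Int × Int) → Bool
  | [] => false
  | (c, d, h) :: rest =>
      if h ≠ g ∧ (pvAnnB threshold pos_err (c - a) (d - b) || pvAnnB threshold pos_err (d - a) (c - b)) = true
      then true
      else pvScanCellB threshold pos_err g a b rest

-- has_neighbor(g, a, b): scan the 3x3 neighbouring cells of (a, b)'s cell
def pvHasNbB (threshold pos_err : Int) (grid : PySem.Dict (Int × Int) (List (Int × Int × Int)))
    (g a b : Int) : Bool :=
  let ca := PySem.Int.floordiv a threshold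
  let cb := PySem.Int.floordiv b threshold
  [ca - 1, ca, ca + 1].any fun qa =>
    [cb - 1, cb, cb + 1].any fun qb =>
      pvScanCellB threshold pos_err g a b (grid.getD (qa, qb) [])

def get_num_isolated_groups_py_alt (positions : List (Int × Int × Int)) (threshold : Int) (pos_err : Int) : Int :=
  -- groups.setdefault(g, []).append((a, b))
  let gd := positions.foldl
    (fun d p => d.modify p.2.2 [] (· ++ [(p.1, p.2.1)])) PySem.Dict.empty
  if threshold ≤ pos_err + 1 ∨ threshold ≤ 0 then
    -- no pair of coordinates can satisfy pos_err < |delta| < threshold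
    (gd.size : Int)
  else
    let grid := gd.items.foldl
      (fun gr it => it.2.foldl
        (fun gr2 p => gr2.modify (PySem.Int.floordiv p.1 threshold, PySem.Int.floordiv p.2 threshold)
          [] (· ++ [(p.1, p.2, it.1)])) gr)
      PySem.Dict.empty
    gd.items.foldl
      (fun n it =>
        if it.2.any (fun p => pvHasNbB threshold pos_err grid it.1 p.1 p.2
            || pvHasNbB threshold pos_err grid it.1 p.2 p.1)
        then n else n + 1) 0

-- ===== PRECONDITION & SPEC =====
def Spec_get_num_isolated_groups_py (positions : List (Int × Int × Int)) (threshold : Int) (pos_err : Int) (out : Int) : Prop := out = get_num_isolated_groups_py_alt positions threshold pos_err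
instance (positions : List (Int × Int × Int)) (threshold : Int) (pos_err : Int) (out : Int) : Decidable (Spec_get_num_isolated_groups_py positions threshold pos_err out) := by unfold Spec_get_num_isolated_groups_py; infer_instance

-- ===== CLAIM (what is proved, stated in full; the proofs are below) =====
def Claim_equal_get_num_isolated_groups_py : Prop := ∀ (positions : List (Int × Int × Int)) (threshold : Int) (pos_err : Int), Dom_get_num_isolated_groups_py positions threshold pos_err → Spec_get_num_isolated_groups_py positions threshold pos_err (get_num_isolated_groups_py positions threshold pos_err)


-- ===== LEMMAS AND PROOFS =====

-- Canonical characterisation: the pair relation between two point lists, and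
-- "group g has some related other group" over the keys of the group dict.
def pvRelF (t e : Int) (ps qs : List (Int × Int)) : Bool :=
  ps.any fun p => qs.any fun q => pvCond1A e t p.1 p.2 q.1 q.2 || pvCond2A e t p.1 p.2 q.1 q.2

def pvRelExB (t e : Int) (gd : PySem.Dict Int (List (Int × Int))) (g : Int) : Bool :=
  gd.keys.any fun h => decide (h ≠ g) && pvRelF t e (gd.getD g []) (gd.getD h [])

theorem pvInnerA_eq (t e pa pb : Int) (qs : List (Int × Int)) :
    pvInnerA t e pa pb qs = qs.any (fun q => pvCond1A e t pa pb q.1 q.2 || pvCond2A e t pa pb q.1 q.2) := by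
  induction qs with
  | nil => rfl
  | cons q rest ih =>
      obtain ⟨pc, pd⟩ := q
      simp only [pvInnerA, List.any_cons]
      split_ifs with h1 h2 <;> simp_all

theorem pvOuterA_eq (t e : Int) (qs ps : List (Int × Int)) :
    pvOuterA t e qs ps = pvRelF t e ps qs := by
  induction ps with
  | nil => rfl
  | cons p rest ih =>
      obtain ⟨pa, pb⟩ := p
      simp only [pvOuterA, pvRelF, List.any_cons]
      rw [pvInnerA_eq] at *
      split_ifs with h <;> simp_all [pvRelF]

theorem pvCond1A_symm (e t a b c d : Int) : pvCond1A e t a b c d = pvCond1A e t c d a b := by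
  simp only [pvCond1A, abs_sub_comm c a, abs_sub_comm d b]

theorem pvCond2A_symm (e t a b c d : Int) : pvCond2A e t a b c d = pvCond2A e t c d a b := by
  simp only [pvCond2A, decide_eq_decide, abs_sub_comm d a, abs_sub_comm c b]; tauto

theorem pvRelF_symm (t e : Int) (ps qs : List (Int × Int)) :
    pvRelF t e ps qs = pvRelF t e qs ps := by
  rw [Bool.eq_iff_iff]
  simp only [pvRelF, List.any_eq_true, Bool.or_eq_true]
  constructor
  · rintro ⟨p, hp, q, hq, h⟩
    exact ⟨q, hq, p, hp, by rw [pvCond1A_symm, pvCond2A_symm] at h; exact h⟩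
  · rintro ⟨q, hq, p, hp, h⟩
    exact ⟨p, hp, q, hq, by rw [pvCond1A_symm, pvCond2A_symm]; exact h⟩

theorem pvGetD_set (l : List Int) (n : Nat) (v : Int) (k : Nat) (d : Int) :
    (l.set n v).getD k d = if k = n ∧ n < l.length then v else l.getD k d := by
  simp [List.getD_eq_getElem?_getD, List.getElem?_set]
  split_ifs with h1 h2 <;> simp_all

-- the j-loop: the close flag is an any over the scanned list
theorem pvJLoopA_fst (t e : Int) (gd : PySem.Dict Int (List (Int × Int)))
    (psA : List (Int × Int)) (i : Int) (found : List Int) (S : List (Int × Int)) :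
    (pvJLoopA t e gd psA i found S).1
      = S.any (fun ja => decide (ja.1 ≠ i) && pvOuterA t e (gd.getD ja.2 []) psA) := by
  induction S generalizing found with
  | nil => rfl
  | cons ja rest ih =>
      obtain ⟨j, agb⟩ := ja
      simp only [pvJLoopA, List.any_cons]
      split_ifs with h1 h2 <;> simp_all

theorem pvJLoopA_snd_of_false (t e : Int) (gd : PySem.Dict Int (List (Int × Int)))
    (psA : List (Int × Int)) (i : Int) (found : List Int) (S : List (Int × Int))
    (h : (pvJLoopA t e gd psA i found S).1 = false) :
    (pvJLoopA t e gd psA i found S).2 = found := by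
  induction S generalizing found with
  | nil => rfl
  | cons ja rest ih =>
      obtain ⟨j, agb⟩ := ja
      simp only [pvJLoopA] at h ⊢
      split_ifs at h ⊢ with h1 h2
      all_goals exact ih found h

theorem pvJLoopA_snd_cases (t e : Int) (gd : PySem.Dict Int (List (Int × Int)))
    (psA : List (Int × Int)) (i : Int) (found : List Int) (S : List (Int × Int)) :
    (pvJLoopA t e gd psA i found S).2 = found ∨
    ∃ ja ∈ S, ja.1 ≠ i ∧ pvOuterA t e (gd.getD ja.2 []) psA = true ∧
      (pvJLoopA t e gd psA i found S).2 = found.set ja.1.toNat 1 := by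
  induction S generalizing found with
  | nil => exact Or.inl rfl
  | cons ja rest ih =>
      obtain ⟨j, agb⟩ := ja
      simp only [pvJLoopA]
      split_ifs with h1 h2
      · rcases ih found with h | ⟨ja', hm, hne, houter, heq⟩
        · exact Or.inl h
        · exact Or.inr ⟨ja', List.mem_cons_of_mem _ hm, hne, houter, heq⟩
      · exact Or.inr ⟨(j, agb), List.mem_cons_self, h1, h2, rfl⟩
      · rcases ih found with h | ⟨ja', hm, hne, houter, heq⟩
        · exact Or.inl h
        · exact Or.inr ⟨ja', List.mem_cons_of_mem _ hm, hne, houter, heq⟩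

-- floor-division cells of two coordinates closer than t differ by at most 1
theorem pvFdivNear (t a c : Int) (ht : 0 < t) (h : |c - a| < t) :
    PySem.Int.floordiv c t = PySem.Int.floordiv a t - 1 ∨
    PySem.Int.floordiv c t = PySem.Int.floordiv a t ∨
    PySem.Int.floordiv c t = PySem.Int.floordiv a t + 1 := by
  rw [PySem.Int.floordiv_eq_ediv_of_pos ht, PySem.Int.floordiv_eq_ediv_of_pos ht]
  have h1 := Int.emod_nonneg a (by omega : t ≠ 0)
  have h2 := Int.emod_lt_of_pos a ht
  have h3 := Int.emod_nonneg c (by omega : t ≠ 0)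
  have h4 := Int.emod_lt_of_pos c ht
  have e1 := Int.mul_ediv_add_emod a t
  have e2 := Int.mul_ediv_add_emod c t
  have habs := abs_lt.mp h
  set q := a / t; set q' := c / t
  have hle : q' - q ≤ 1 := by nlinarith
  have hge : -1 ≤ q' - q := by nlinarith
  omega

theorem pvScanCellB_eq (t e g a b : Int) (l : List (Int × Int × Int)) :
    pvScanCellB t e g a b l
      = l.any (fun q => decide (q.2.2 ≠ g)
          && (pvAnnB t e (q.1 - a) (q.2.1 - b) || pvAnnB t e (q.2.1 - a) (q.1 - b))) := by
  induction l with
  | nil => rfl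
  | cons q rest ih =>
      obtain ⟨c, d, h⟩ := q
      simp only [pvScanCellB, List.any_cons]
      split_ifs with h1 <;> simp_all

-- mirrored annular calls are A's conditions
theorem pvAnn_cond2_mirror (t e a b c d : Int) :
    pvAnnB t e (c - b) (d - a) = pvCond2A e t a b c d := by
  simp only [pvAnnB, pvCond2A, decide_eq_decide]; tauto

-- the flattened grid contents
def pvFlat (gd : PySem.Dict Int (List (Int × Int))) : List (Int × Int × Int) :=
  gd.items.flatMap fun it => it.2.map fun p => (p.1, p.2, it.1)

theorem pvMem_flat (gd : PySem.Dict Int (List (Int × Int))) (q : Int × Int × Int) :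
    q ∈ pvFlat gd ↔ ∃ it ∈ gd.items, ∃ p ∈ it.2, q = (p.1, p.2, it.1) := by
  simp [pvFlat, eq_comm]

theorem pvGrid_getD (t : Int) (gd : PySem.Dict Int (List (Int × Int))) (cell : Int × Int)
    (q : Int × Int × Int) :
    q ∈ (gd.items.foldl
      (fun gr it => it.2.foldl
        (fun gr2 p => gr2.modify (PySem.Int.floordiv p.1 t, PySem.Int.floordiv p.2 t)
          [] (· ++ [(p.1, p.2, it.1)])) gr)
      PySem.Dict.empty).getD cell []
    ↔ q ∈ pvFlat gd ∧ cell = (PySem.Int.floordiv q.1 t, PySem.Int.floordiv q.2.1 t) := by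
  have hflat : (gd.items.foldl
      (fun gr it => it.2.foldl
        (fun gr2 p => gr2.modify (PySem.Int.floordiv p.1 t, PySem.Int.floordiv p.2 t)
          [] (· ++ [(p.1, p.2, it.1)])) gr)
      PySem.Dict.empty)
      = ((pvFlat gd).map (fun q => ((PySem.Int.floordiv q.1 t, PySem.Int.floordiv q.2.1 t), q))).foldl
          (fun d p => d.modify p.1 [] (· ++ [p.2])) PySem.Dict.empty := by
    rw [List.foldl_map]
    unfold pvFlat
    rw [List.flatMap_def, List.foldl_flatten, List.foldl_map]
    simp only [List.foldl_map]
  rw [hflat, PySem.Dict.getD_foldl_modify_append]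
  simp only [PySem.Dict.getD_empty, List.nil_append, List.mem_map, List.mem_filter,
    List.mem_map, beq_iff_eq]
  constructor
  · rintro ⟨p, ⟨⟨q', hq', rfl⟩, hkey⟩, rfl⟩
    exact ⟨hq', hkey.symm⟩
  · rintro ⟨hq, hcell⟩
    exact ⟨((PySem.Int.floordiv q.1 t, PySem.Int.floordiv q.2.1 t), q), ⟨⟨q, hq, rfl⟩, hcell.symm⟩, rfl⟩

-- ===== the two directions of the detection/relation equivalence =====
theorem pvDetect_eq_relExB (t e : Int) (gd : PySem.Dict Int (List (Int × Int)))
    (hnd : gd.keys.Nodup) (ht0 : 0 < t)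
    (it : Int × List (Int × Int)) (hit : it ∈ gd.items) :
    (it.2.any (fun p => pvHasNbB t e (gd.items.foldl
      (fun gr it => it.2.foldl
        (fun gr2 p => gr2.modify (PySem.Int.floordiv p.1 t, PySem.Int.floordiv p.2 t)
          [] (· ++ [(p.1, p.2, it.1)])) gr)
      PySem.Dict.empty) it.1 p.1 p.2
      || pvHasNbB t e (gd.items.foldl
      (fun gr it => it.2.foldl
        (fun gr2 p => gr2.modify (PySem.Int.floordiv p.1 t, PySem.Int.floordiv p.2 t)
          [] (· ++ [(p.1, p.2, it.1)])) gr)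
      PySem.Dict.empty) it.1 p.2 p.1))
    = pvRelExB t e gd it.1 := by
  set grid := gd.items.foldl
      (fun gr it => it.2.foldl
        (fun gr2 p => gr2.modify (PySem.Int.floordiv p.1 t, PySem.Int.floordiv p.2 t)
          [] (· ++ [(p.1, p.2, it.1)])) gr)
      PySem.Dict.empty with hgrid
  have hmemgrid : ∀ (cell : Int × Int) (q : Int × Int × Int),
      q ∈ grid.getD cell [] ↔ q ∈ pvFlat gd ∧ cell = (PySem.Int.floordiv q.1 t, PySem.Int.floordiv q.2.1 t) :=
    fun cell q => pvGrid_getD t gd cell q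
  have hptsit : gd.getD it.1 [] = it.2 := PySem.Dict.getD_of_mem_items gd (by exact hit) hnd []
  -- scan of one cell, as an existential
  have hscan : ∀ (g a b : Int) (cell : Int × Int),
      (pvScanCellB t e g a b (grid.getD cell []) = true)
        ↔ ∃ q ∈ grid.getD cell [], q.2.2 ≠ g ∧
            (pvAnnB t e (q.1 - a) (q.2.1 - b) || pvAnnB t e (q.2.1 - a) (q.1 - b)) = true := by
    intro g a b cell
    rw [pvScanCellB_eq]
    simp [List.any_eq_true]
  rw [Bool.eq_iff_iff]
  simp only [List.any_eq_true, Bool.or_eq_true, pvHasNbB]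
  constructor
  · rintro ⟨p, hp, hcase⟩
    have hfind : ∃ (c d h : Int), (c, d, h) ∈ pvFlat gd ∧ h ≠ it.1 ∧
        (pvCond1A e t p.1 p.2 c d || pvCond2A e t p.1 p.2 c d) = true := by
      rcases hcase with hnb | hnb
      · obtain ⟨qa, -, qb, -, hsc⟩ := hnb
        obtain ⟨⟨c, d, h⟩, hq, hne, hcond⟩ := (hscan _ _ _ _).mp hsc
        exact ⟨c, d, h, ((hmemgrid _ _).mp hq).1, hne, hcond⟩
      · obtain ⟨qa, -, qb, -, hsc⟩ := hnb
        obtain ⟨⟨c, d, h⟩, hq, hne, hcond⟩ := (hscan _ _ _ _).mp hsc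
        refine ⟨c, d, h, ((hmemgrid _ _).mp hq).1, hne, ?_⟩
        simp only [pvAnn_cond2_mirror] at hcond
        simp only [Bool.or_eq_true] at hcond ⊢
        tauto
    obtain ⟨c, d, h, hflat, hne, hcond⟩ := hfind
    rw [pvMem_flat] at hflat
    obtain ⟨it', hit', p', hp', heq⟩ := hflat
    have hh : h = it'.1 := congrArg (·.2.2) heq
    have hc : c = p'.1 := congrArg (·.1) heq
    have hd : d = p'.2 := congrArg (·.2.1) heq
    subst hh hc hd
    simp only [pvRelExB, List.any_eq_true, Bool.and_eq_true, decide_eq_true_eq]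
    refine ⟨it'.1, PySem.Dict.mem_keys_of_mem_items gd hit', hne, ?_⟩
    have hpts' : gd.getD it'.1 [] = it'.2 := PySem.Dict.getD_of_mem_items gd (by
      have : (it'.1, it'.2) = it' := rfl
      rw [this]; exact hit') hnd []
    simp only [pvRelF, List.any_eq_true, hptsit, hpts']
    exact ⟨p, hp, p', hp', hcond⟩
  · intro hrel
    simp only [pvRelExB, List.any_eq_true, Bool.and_eq_true, decide_eq_true_eq] at hrel
    obtain ⟨h, hK, hne, hrelF⟩ := hrel
    simp only [pvRelF, List.any_eq_true, Bool.or_eq_true, hptsit] at hrelF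
    obtain ⟨p, hp, q, hq, hcond⟩ := hrelF
    -- the witness point of group h sits in the grid
    obtain ⟨it', hit', rfl⟩ := List.mem_map.mp (show h ∈ gd.items.map (·.1) from hK)
    have hpts' : gd.getD it'.1 [] = it'.2 := PySem.Dict.getD_of_mem_items gd (by
      have : (it'.1, it'.2) = it' := rfl
      rw [this]; exact hit') hnd []
    rw [hpts'] at hq
    have hqflat : (q.1, q.2, it'.1) ∈ pvFlat gd := by
      rw [pvMem_flat]
      exact ⟨it', hit', q, hq, rfl⟩
    have hqgrid : (q.1, q.2, it'.1) ∈ grid.getD (PySem.Int.floordiv q.1 t, PySem.Int.floordiv q.2 t) [] := by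
      rw [hmemgrid]
      exact ⟨hqflat, rfl⟩
    refine ⟨p, hp, ?_⟩
    have hmem3 : ∀ x y : Int, |x - y| < t →
        PySem.Int.floordiv x t ∈ [PySem.Int.floordiv y t - 1, PySem.Int.floordiv y t, PySem.Int.floordiv y t + 1] := by
      intro x y hxy
      rcases pvFdivNear t y x ht0 hxy with h1 | h1 | h1 <;> simp [h1]
    rcases hcond with hc1 | hc2
    · -- first condition: q's cell is adjacent to (p.1, p.2)'s cell
      left
      obtain ⟨-, hlt1, -, hlt2⟩ := of_decide_eq_true hc1
      refine ⟨PySem.Int.floordiv q.1 t, hmem3 q.1 p.1 hlt1, PySem.Int.floordiv q.2 t, hmem3 q.2 p.2 hlt2, ?_⟩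
      rw [hscan]
      refine ⟨(q.1, q.2, it'.1), hqgrid, hne, ?_⟩
      simp only [Bool.or_eq_true]
      left
      exact hc1
    · -- second condition: q's cell is adjacent to the mirrored (p.2, p.1) cell
      right
      obtain ⟨-, hlt1, -, hlt2⟩ := of_decide_eq_true hc2
      refine ⟨PySem.Int.floordiv q.1 t, hmem3 q.1 p.2 hlt2, PySem.Int.floordiv q.2 t, hmem3 q.2 p.1 hlt1, ?_⟩
      rw [hscan]
      refine ⟨(q.1, q.2, it'.1), hqgrid, hne, ?_⟩
      simp only [Bool.or_eq_true]
      left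
      rw [pvAnn_cond2_mirror]
      exact hc2

-- ===== A-side loop invariant =====
def pvInv (t e : Int) (gd : PySem.Dict Int (List (Int × Int))) (G : List Int)
    (found : List Int) : Prop :=
  ∀ (k : Nat) (hk : k < G.length), found.getD k 0 ≠ 0 → pvRelExB t e gd G[k] = true

theorem pvJLoopA_close (t e : Int) (gd : PySem.Dict Int (List (Int × Int))) (G : List Int)
    (hperm : G.Perm gd.keys) (hnd : G.Nodup) (i0 : Nat) (hi0 : i0 < G.length)
    (found : List Int) :
    (pvJLoopA t e gd (gd.getD G[i0] []) (i0 : Int) found (PySem.List.enumerate G 0)).1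
      = pvRelExB t e gd G[i0] := by
  rw [pvJLoopA_fst, Bool.eq_iff_iff]
  simp only [List.any_eq_true, Bool.and_eq_true, decide_eq_true_eq, pvRelExB]
  constructor
  · rintro ⟨ja, hm, hne, houter⟩
    rw [PySem.List.mem_enumerate_iff] at hm
    obtain ⟨k, hk, rfl⟩ := hm
    simp only [zero_add] at hne houter ⊢
    refine ⟨G[k], hperm.mem_iff.mp (List.getElem_mem hk), ?_, ?_⟩
    · intro hEq
      have hki : k = i0 := (List.Nodup.getElem_inj_iff hnd).mp hEq
      exact hne (by exact_mod_cast congrArg (fun n : Nat => (n : Int)) hki)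
    · rw [pvOuterA_eq] at houter; exact houter
  · rintro ⟨h, hmem, hne, hrel⟩
    have hmG : h ∈ G := hperm.mem_iff.mpr hmem
    obtain ⟨k, hk, rfl⟩ := List.getElem_of_mem hmG
    refine ⟨((k : Int), G[k]), ?_, ?_, ?_⟩
    · rw [PySem.List.mem_enumerate_iff]; exact ⟨k, hk, by simp⟩
    · simp only []
      intro hEq
      have hki : k = i0 := by exact_mod_cast hEq
      subst hki
      exact hne rfl
    · rw [pvOuterA_eq]; exact hrel

theorem pvJLoopA_inv (t e : Int) (gd : PySem.Dict Int (List (Int × Int))) (G : List Int)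
    (hperm : G.Perm gd.keys) (hnd : G.Nodup) (i0 : Nat) (hi0 : i0 < G.length)
    (found : List Int) (hInv : pvInv t e gd G found) :
    pvInv t e gd G (pvJLoopA t e gd (gd.getD G[i0] []) (i0 : Int) found (PySem.List.enumerate G 0)).2 := by
  rcases pvJLoopA_snd_cases t e gd (gd.getD G[i0] []) (i0 : Int) found (PySem.List.enumerate G 0)
    with heq | ⟨ja, hm, hne, houter, heq⟩
  · rw [heq]; exact hInv
  · rw [heq]
    rw [PySem.List.mem_enumerate_iff] at hm
    obtain ⟨k', hk', rfl⟩ := hm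
    simp only [zero_add] at hne houter ⊢
    intro k hk hval
    rw [pvGetD_set] at hval
    split_ifs at hval with hcond
    · obtain ⟨rfl, -⟩ := hcond
      simp only [pvRelExB, List.any_eq_true, Bool.and_eq_true, decide_eq_true_eq]
      refine ⟨G[i0], hperm.mem_iff.mp (List.getElem_mem hi0), ?_, ?_⟩
      · intro hEq
        have hki : i0 = k := (List.Nodup.getElem_inj_iff hnd).mp hEq
        exact hne (by exact_mod_cast congrArg (fun n : Nat => (n : Int)) hki.symm)
      · rw [pvOuterA_eq] at houter
        rw [pvRelF_symm]
        exact houter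
    · exact hInv k hk hval

theorem pvILoopA_spec (t e : Int) (gd : PySem.Dict Int (List (Int × Int))) (G : List Int)
    (hperm : G.Perm gd.keys) (hnd : G.Nodup) (S : List (Int × Int)) (acc : Int × List Int)
    (hS : ∀ ja ∈ S, ∃ (k : Nat) (hk : k < G.length), ja = ((k : Int), G[k]))
    (hInv : pvInv t e gd G acc.2) :
    (pvILoopA t e gd (PySem.List.enumerate G 0) acc S).1
      = acc.1 + (S.countP (fun ja => !pvRelExB t e gd ja.2) : Int) := by
  induction S generalizing acc with
  | nil => simp [pvILoopA]
  | cons ja rest ih =>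
      obtain ⟨k, hk, rfl⟩ := hS ja List.mem_cons_self
      have hS' : ∀ ja ∈ rest, ∃ (k : Nat) (hk : k < G.length), ja = ((k : Int), G[k]) :=
        fun ja hm => hS ja (List.mem_cons_of_mem _ hm)
      simp only [pvILoopA, Int.toNat_natCast]
      by_cases hfound : acc.2.getD k 0 ≠ 0
      · have hrel : pvRelExB t e gd G[k] = true := hInv k hk hfound
        rw [if_pos hfound, ih acc hS' hInv, List.countP_cons]
        simp [hrel]
      · rw [if_neg hfound]
        have hclose := pvJLoopA_close t e gd G hperm hnd k hk acc.2
        by_cases hrel : pvRelExB t e gd G[k] = true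
        · have hfst : (pvJLoopA t e gd (gd.getD G[k] []) (k : Int) acc.2 (PySem.List.enumerate G 0)).1 = true := by
            rw [hclose]; exact hrel
          rw [if_pos hfst,
            ih _ hS' (pvJLoopA_inv t e gd G hperm hnd k hk acc.2 hInv), List.countP_cons]
          simp [hrel]
        · have hfst : ¬ (pvJLoopA t e gd (gd.getD G[k] []) (k : Int) acc.2 (PySem.List.enumerate G 0)).1 = true := by
            rw [hclose]; exact hrel
          rw [if_neg hfst]
          have hsnd := pvJLoopA_snd_of_false t e gd (gd.getD G[k] []) (k : Int) acc.2
            (PySem.List.enumerate G 0) (by simpa using hfst)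
          rw [ih _ hS' (by rw [hsnd]; exact hInv), List.countP_cons]
          simp [hrel]
          ring

theorem pvFoldCount (p : (Int × List (Int × Int)) → Bool) (l : List (Int × List (Int × Int))) (n : Int) :
    l.foldl (fun n it => if p it then n else n + 1) n = n + (l.countP (fun it => !p it) : Int) := by
  induction l generalizing n with
  | nil => simp
  | cons it rest ih =>
      simp only [List.foldl_cons, List.countP_cons, ih]
      by_cases h : p it
      · simp [h]
      · simp [h]
        ring

theorem pvA_eq_count (positions : List (Int × Int × Int)) (t e : Int) :
    get_num_isolated_groups_py positions t e
      = (((positions.foldl (fun d p => d.modify p.2.2 [] (· ++ [(p.1, p.2.1)]))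
          PySem.Dict.empty).keys).countP
            (fun g => !pvRelExB t e (positions.foldl (fun d p => d.modify p.2.2 [] (· ++ [(p.1, p.2.1)]))
              PySem.Dict.empty) g) : Int) := by
  unfold get_num_isolated_groups_py
  set gd := positions.foldl (fun d p => d.modify p.2.2 [] (· ++ [(p.1, p.2.1)]))
    (PySem.Dict.empty : PySem.Dict Int (List (Int × Int))) with hgd
  have hndK : gd.keys.Nodup := by
    rw [hgd]
    exact PySem.Dict.nodup_keys_foldl_modify_key positions (fun p => p.2.2) []
      (fun d x => (· ++ [(x.1, x.2.1)])) _ (by simp)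
  set G := PySem.List.sorted gd.keys (fun x => x) false with hG
  have hperm : G.Perm gd.keys := PySem.List.sorted_perm gd.keys (fun x => x) false
  have hnd : G.Nodup := (hperm.nodup_iff).mpr hndK
  rw [pvILoopA_spec t e gd G hperm hnd (PySem.List.enumerate G 0)
      (0, List.replicate positions.length (0 : Int))
      (by
        intro ja hm
        rw [PySem.List.mem_enumerate_iff] at hm
        obtain ⟨k, hk, rfl⟩ := hm
        exact ⟨k, hk, by simp⟩)
      (by
        intro k hk hval
        exfalso
        apply hval
        simp [List.getD_eq_getElem?_getD, List.getElem?_replicate]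
        split_ifs <;> simp)]
  have hcnt : (PySem.List.enumerate G 0).countP (fun ja => !pvRelExB t e gd ja.2)
      = G.countP (fun g => !pvRelExB t e gd g) := by
    conv_rhs => rw [← PySem.List.map_snd_enumerate G 0]
    rw [List.countP_map]
    rfl
  rw [hcnt, hperm.countP_eq]
  ring

theorem pvB_eq_count (positions : List (Int × Int × Int)) (t e : Int) :
    get_num_isolated_groups_py_alt positions t e
      = (((positions.foldl (fun d p => d.modify p.2.2 [] (· ++ [(p.1, p.2.1)]))
          PySem.Dict.empty).keys).countP
            (fun g => !pvRelExB t e (positions.foldl (fun d p => d.modify p.2.2 [] (· ++ [(p.1, p.2.1)]))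
              PySem.Dict.empty) g) : Int) := by
  unfold get_num_isolated_groups_py_alt
  set gd := positions.foldl (fun d p => d.modify p.2.2 [] (· ++ [(p.1, p.2.1)]))
    (PySem.Dict.empty : PySem.Dict Int (List (Int × Int))) with hgd
  have hndK : gd.keys.Nodup := by
    rw [hgd]
    exact PySem.Dict.nodup_keys_foldl_modify_key positions (fun p => p.2.2) []
      (fun d x => (· ++ [(x.1, x.2.1)])) _ (by simp)
  by_cases hguard : t ≤ e + 1 ∨ t ≤ 0
  · rw [if_pos hguard]
    -- the annular band is empty: nothing is related, every group is isolated
    have hcond : ∀ x y : Int, ¬ (e < |x| ∧ |x| < t ∧ e < |y| ∧ |y| < t) := by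
      rintro x y ⟨h1, h2, h3, h4⟩
      have hx := abs_nonneg x
      omega
    have hrelF : ∀ ps qs, pvRelF t e ps qs = false := by
      intro ps qs
      rw [pvRelF, List.any_eq_false]
      intro p _
      simp only [List.any_eq_true, not_exists, not_and, Bool.or_eq_true, not_or]
      intro q _
      constructor <;> · simp only [pvCond1A, pvCond2A, decide_eq_true_eq]; exact hcond _ _
    have hnorel : ∀ g, pvRelExB t e gd g = false := by
      intro g
      rw [pvRelExB, List.any_eq_false]
      intro h _
      simp [hrelF]
    have hlen : gd.keys.countP (fun g => !pvRelExB t e gd g) = gd.keys.length :=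
      List.countP_eq_length.mpr (fun g _ => by simp [hnorel])
    rw [hlen]
    simp [PySem.Dict.size, PySem.Dict.keys]
  · rw [if_neg hguard]
    have ht0 : 0 < t := by omega
    rw [pvFoldCount]
    have hcongr : gd.items.countP (fun it => !(it.2.any (fun p =>
          pvHasNbB t e (gd.items.foldl
            (fun gr it => it.2.foldl
              (fun gr2 p => gr2.modify (PySem.Int.floordiv p.1 t, PySem.Int.floordiv p.2 t)
                [] (· ++ [(p.1, p.2, it.1)])) gr)
            PySem.Dict.empty) it.1 p.1 p.2
          || pvHasNbB t e (gd.items.foldl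
            (fun gr it => it.2.foldl
              (fun gr2 p => gr2.modify (PySem.Int.floordiv p.1 t, PySem.Int.floordiv p.2 t)
                [] (· ++ [(p.1, p.2, it.1)])) gr)
            PySem.Dict.empty) it.1 p.2 p.1)))
        = gd.items.countP (fun it => !pvRelExB t e gd it.1) := by
      apply List.countP_congr
      intro it hit
      rw [pvDetect_eq_relExB t e gd hndK ht0 it hit]
    rw [hcongr]
    have hmapped : gd.items.countP (fun it => !pvRelExB t e gd it.1)
        = gd.keys.countP (fun g => !pvRelExB t e gd g) := by
      have : gd.keys = gd.items.map (·.1) := rfl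
      rw [this, List.countP_map]
      rfl
    rw [hmapped]
    ring

-- ===== VERDICT (by name: the statement is the Claim_ definition above) =====
theorem get_num_isolated_groups_py_spec : Claim_equal_get_num_isolated_groups_py := by
  intro positions t e _
  unfold Spec_get_num_isolated_groups_py
  rw [pvA_eq_count, pvB_eq_count]
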